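-- pv_equiv track=rewrite | github.com/AndrewParkJH/291d_final | benchmark/RoadNetworkGenerator.py | extract_maxspeed
-- ===== SOURCE A (Python) =====
-- def extract_maxspeed(maxspeed_list):
--     """
--     Extract and return the maximum speed from a list of speed strings.
--     Parameters:
--     - maxspeed_list: list of speed limit strings (e.g., ['40 mph', '50 mph'])
--
--     Returns:
--     - max_speed: int, the maximum speed limit in the list (or a default value if unavailable).
--     """
--     speeds = []
--     for speed in maxspeed_list:
--         try:
--             speeds.append(int(speed.split()[0]))  # Extract numeric part
--         except (ValueError, IndexError):
--             continue  # Skip invalid entries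
--     return max(speeds) if speeds else 50  # Default to 50 mph if no valid speed
-- ===== SOURCE B (Python) =====
-- def extract_maxspeed(maxspeed_list):
--     def _parse(s):
--         try:
--             return int(s.split()[0])
--         except (ValueError, IndexError):
--             return None
--     vals = sorted(v for v in map(_parse, maxspeed_list) if v is not None)
--     return vals[-1] if vals else 50
-- ===== Notes on version B (the rewrite author's own statement) =====
-- stated objective: alternative
-- what changed: B sorts the parseable speeds ascending and returns the last element of the sorted list, instead of A's build-a-list-then-linear-max; the filtering is done by a generator over map(_parse, ...) rather than try/append inside the loop.
import Mathlib
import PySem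

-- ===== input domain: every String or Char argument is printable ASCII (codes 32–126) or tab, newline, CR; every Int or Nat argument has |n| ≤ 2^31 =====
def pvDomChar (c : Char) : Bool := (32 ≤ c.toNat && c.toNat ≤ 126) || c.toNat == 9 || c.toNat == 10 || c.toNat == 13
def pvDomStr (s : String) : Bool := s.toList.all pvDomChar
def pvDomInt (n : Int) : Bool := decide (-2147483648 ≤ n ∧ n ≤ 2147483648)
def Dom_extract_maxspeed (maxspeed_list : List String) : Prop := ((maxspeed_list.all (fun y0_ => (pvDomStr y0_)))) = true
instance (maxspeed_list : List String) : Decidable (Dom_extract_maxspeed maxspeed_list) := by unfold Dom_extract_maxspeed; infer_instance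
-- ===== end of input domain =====

-- B sorts the parseable speeds ascending and returns the last element, instead of A's
-- build-a-list-then-linear-max (objective: alternative; same return value).

-- ===== PORT A =====
def extract_maxspeed (maxspeed_list : List String) : Int :=
  let speeds : List Int := maxspeed_list.foldl (fun acc speed =>
    match PySem.List.pyGet? (PySem.Str.split₀ speed) 0 with
    | none => acc          -- IndexError: skip
    | some w =>
      match PySem.Int.ofStr? w with
      | none => acc        -- ValueError: skip
      | some v => acc ++ [v]) []
  match PySem.List.max? speeds (fun x => x) with
  | some m => m
  | none => 50

-- ===== PORT B =====
def pvParseSpeed (speed : String) : Option Int :=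
  (PySem.List.pyGet? (PySem.Str.split₀ speed) 0).bind PySem.Int.ofStr?

def extract_maxspeed_alt (maxspeed_list : List String) : Int :=
  let vals : List Int :=
    PySem.List.sorted ((maxspeed_list.map pvParseSpeed).filterMap (fun v => v)) (fun x => x)
  match vals with
  | [] => 50
  | _ => (PySem.List.pyGet? vals (-1)).getD 50   -- vals[-1]; vals is nonempty here, so the get succeeds

-- ===== PRECONDITION & SPEC =====
def Spec_extract_maxspeed (maxspeed_list : List String) (out : Int) : Prop := out = extract_maxspeed_alt maxspeed_list
instance (maxspeed_list : List String) (out : Int) : Decidable (Spec_extract_maxspeed maxspeed_list out) := by unfold Spec_extract_maxspeed; infer_instance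

-- ===== CLAIM =====
def Claim_equal_extract_maxspeed : Prop := ∀ (maxspeed_list : List String), Dom_extract_maxspeed maxspeed_list → Spec_extract_maxspeed maxspeed_list (extract_maxspeed maxspeed_list)

-- ===== LEMMAS AND PROOFS =====

-- A's loop appends exactly the parseable entries: it is acc ++ filterMap pvParseSpeed.
theorem foldA_eq_filterMap (l : List String) (acc : List Int) :
    l.foldl (fun acc speed =>
      match PySem.List.pyGet? (PySem.Str.split₀ speed) 0 with
      | none => acc
      | some w =>
        match PySem.Int.ofStr? w with
        | none => acc
        | some v => acc ++ [v]) acc = acc ++ l.filterMap pvParseSpeed := by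
  induction l generalizing acc with
  | nil => simp
  | cons s t ih =>
    simp only [List.foldl_cons, List.filterMap_cons]
    cases h1 : PySem.List.pyGet? (PySem.Str.split₀ s) 0 with
    | none =>
      have hp : pvParseSpeed s = none := by simp [pvParseSpeed, h1]
      simp only [hp, ih]
    | some w =>
      cases h2 : PySem.Int.ofStr? w with
      | none =>
        have hp : pvParseSpeed s = none := by simp [pvParseSpeed, h1, h2]
        simp only [hp, h2, ih]
      | some v =>
        have hp : pvParseSpeed s = some v := by simp [pvParseSpeed, h1, h2]
        simp only [hp, h2, ih]
        simp

-- The last element of the ascending sorted list is the maximum value.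
theorem getLast?_sorted_eq_max? (L : List Int) :
    (PySem.List.sorted L (fun x => x)).getLast? = PySem.List.max? L (fun x => x) := by
  cases hM : PySem.List.max? L (fun x => x) with
  | none =>
    have hL : L = [] := (PySem.List.max?_eq_none_iff L (fun x => x)).mp hM
    subst hL
    simp [(PySem.List.sorted_eq_nil_iff ([] : List Int) (fun x => x) false).mpr rfl]
  | some m =>
    have hmem : m ∈ L := PySem.List.max?_mem hM
    have hmax : ∀ y ∈ L, y ≤ m := PySem.List.max?_isMax hM
    have hSne : PySem.List.sorted L (fun x => x) ≠ [] := by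
      intro h
      have : L = [] := (PySem.List.sorted_eq_nil_iff L (fun x => x) false).mp h
      subst this; simp at hmem
    have hx : (PySem.List.sorted L (fun x => x)).getLast?
        = some ((PySem.List.sorted L (fun x => x)).getLast hSne) :=
      List.getLast?_eq_some_getLast hSne
    have hxS : (PySem.List.sorted L (fun x => x)).getLast hSne ∈ PySem.List.sorted L (fun x => x) :=
      List.getLast_mem hSne
    have hxL : (PySem.List.sorted L (fun x => x)).getLast hSne ∈ L :=
      (PySem.List.mem_sorted L (fun x => x) false _).mp hxS
    have h1 : (PySem.List.sorted L (fun x => x)).getLast hSne ≤ m := hmax _ hxL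
    have hmS : m ∈ PySem.List.sorted L (fun x => x) :=
      (PySem.List.mem_sorted L (fun x => x) false m).mpr hmem
    obtain ⟨p, hp, hpe⟩ := List.mem_iff_getElem.mp hmS
    have hlast : (PySem.List.sorted L (fun x => x)).getLast hSne
        = (PySem.List.sorted L (fun x => x))[(PySem.List.sorted L (fun x => x)).length - 1] :=
      List.getLast_eq_getElem hSne
    have hlen : 0 < (PySem.List.sorted L (fun x => x)).length := by
      cases hE : PySem.List.sorted L (fun x => x) with
      | nil => exact absurd hE hSne
      | cons a t => simp
    have mono : (PySem.List.sorted L (fun x => x))[p]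
        ≤ (PySem.List.sorted L (fun x => x))[(PySem.List.sorted L (fun x => x)).length - 1] :=
      PySem.List.sorted_id_getElem_mono L (by omega) (by omega)
    have h2 : m ≤ (PySem.List.sorted L (fun x => x)).getLast hSne := by
      rw [hlast, ← hpe]; exact mono
    rw [hx, le_antisymm h1 h2]

-- ===== VERDICT =====
theorem extract_maxspeed_spec : Claim_equal_extract_maxspeed := by
  intro l _
  show extract_maxspeed l = extract_maxspeed_alt l
  unfold extract_maxspeed extract_maxspeed_alt
  rw [foldA_eq_filterMap]
  simp only [List.nil_append]
  have hfm : (l.map pvParseSpeed).filterMap (fun v => v) = l.filterMap pvParseSpeed := by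
    simp [List.filterMap_map]
  rw [hfm]
  have h := getLast?_sorted_eq_max? (l.filterMap pvParseSpeed)
  cases hs : PySem.List.sorted (l.filterMap pvParseSpeed) (fun x => x) with
  | nil =>
    rw [hs] at h
    simp only [List.getLast?_nil] at h
    rw [← h]
  | cons a t =>
    rw [hs] at h
    rw [← h]
    have hlen : 0 < (a :: t).length := by simp
    have : PySem.List.pyGet? (a :: t) (-1) = some ((a :: t).getLast (by simp)) := by
      simp [PySem.List.pyGet?, PySem.List.pyIdx?, List.getLast_eq_getElem]
      rfl
    rw [this]
    simp [List.getLast?_eq_some_getLast (l := a :: t) (by simp)]
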